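-- pv_equiv track=rewrite | github.com/diwert-ai/Problems | Problems/HSE_DPO_DS/DPO_Algo_2023/contest 9/graph cut.py | process_queries
-- ===== SOURCE A (Python) =====
-- def process_queries(queries):
--     n = len(queries)
--     parents = [i for i in range(n)]
--
--     def find(a):
--         root = a
--         while parents[root] != root:
--             root = parents[root]
--
--         # делаем сжатие путей
--         while parents[a] != a:
--             next_element = parents[a]
--             parents[a] = root
--             a = next_element
--
--         return root
--
--     result = []
--     while queries:
--         query, v1, v2 = queries.pop()
--         root_v1, root_v2 = find(v1), find(v2)
--         if query == 'ask':
--             result.append('YES' if root_v1 == root_v2 else 'NO')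
--         else:
--             parents[root_v2] = root_v1
--
--     return result[::-1]
-- ===== SOURCE B (Python) =====
-- def process_queries(queries):
--     n = len(queries)
--     parents = list(range(n))
--
--     # classic recursive path-compressing find instead of A's two explicit loops
--     def find(a):
--         p = parents[a]
--         if p == a:
--             return a
--         root = find(p)
--         parents[a] = root
--         return root
--
--     result = []
--     while queries:
--         query, v1, v2 = queries.pop()
--         root_v1 = find(v1)
--         root_v2 = find(v2)
--         if query == 'ask':
--             result.append('YES' if root_v1 == root_v2 else 'NO')
--         else:
--             parents[root_v2] = root_v1
--
--     return result[::-1]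
-- ===== Notes on version B (the rewrite author's own statement) =====
-- stated objective: alternative
-- what changed: A's two-pass iterative find (one while-loop to locate the root, a second while-loop to re-point the path) is replaced by the classic single recursive path-compressing find; the reverse-processing skeleton, queries.pop() mutation and final reversal are kept.
import Mathlib
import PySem

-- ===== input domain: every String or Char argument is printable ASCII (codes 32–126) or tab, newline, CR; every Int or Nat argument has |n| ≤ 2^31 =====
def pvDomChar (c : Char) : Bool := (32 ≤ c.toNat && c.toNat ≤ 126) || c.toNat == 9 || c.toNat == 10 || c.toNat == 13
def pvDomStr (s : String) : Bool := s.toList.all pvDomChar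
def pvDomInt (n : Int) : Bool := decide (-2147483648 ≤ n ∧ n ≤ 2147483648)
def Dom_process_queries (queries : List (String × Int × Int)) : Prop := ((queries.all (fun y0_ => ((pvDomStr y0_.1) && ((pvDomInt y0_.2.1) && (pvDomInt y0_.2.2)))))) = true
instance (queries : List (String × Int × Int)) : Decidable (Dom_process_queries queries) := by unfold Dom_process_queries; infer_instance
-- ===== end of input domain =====

-- B replaces A's two-pass iterative find (root-locating while-loop, then a compression
-- while-loop) by the classic single recursive path-compressing find; the reverse-processing
-- skeleton, the queries.pop() mutation (both A and B empty the argument list) and the final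
-- reversal are kept.  Equivalence is about the return value.

-- ===== PORT A =====
-- first while-loop of find: root = a; while parents[root] != root: root = parents[root]
def pvWalk (fuel : Nat) (ps : List Int) (root : Int) : Int :=
  match fuel with
  | 0 => root
  | f + 1 =>
    if PySem.List.pyGetD ps root 0 = root then root
    else pvWalk f ps (PySem.List.pyGetD ps root 0)

-- second while-loop of find: while parents[a] != a: next = parents[a]; parents[a] = root; a = next
def pvCompress (fuel : Nat) (ps : List Int) (a root : Int) : List Int :=
  match fuel with
  | 0 => ps
  | f + 1 =>
    if PySem.List.pyGetD ps a 0 = a then ps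
    else pvCompress f (PySem.List.pySetD ps a root) (PySem.List.pyGetD ps a 0) root

-- A's find(a); the while-loops get fuel |parents| + 2, enough for every acyclic parents array
def pvFindA (ps : List Int) (a : Int) : Int × List Int :=
  let root := pvWalk (ps.length + 2) ps a
  (root, pvCompress (ps.length + 2) ps a root)

-- while queries: queries.pop() consumes the list back to front, so we recurse over the reversed list
def pvLoopA : List (String × Int × Int) → List Int → List String → List String
  | [], _, result => result
  | (query, v1, v2) :: rest, ps, result =>
    let f1 := pvFindA ps v1
    let f2 := pvFindA f1.2 v2
    if query = "ask" then
      pvLoopA rest f2.2 (result ++ [if f1.1 = f2.1 then "YES" else "NO"])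
    else
      pvLoopA rest (PySem.List.pySetD f2.2 f2.1 f1.1) result

def process_queries (queries : List (String × Int × Int)) : List String :=
  -- parents = [i for i in range(n)]; result[::-1] is List.reverse (PySem.List.slice?_none_none_neg_one)
  (pvLoopA queries.reverse (PySem.List.pyRange 0 (queries.length : Int) 1) []).reverse

-- ===== PORT B =====
-- B's recursive path-compressing find: p = parents[a]; if p == a: return a;
-- root = find(p); parents[a] = root; return root   (same fuel policy as A's loops)
def pvFindB (fuel : Nat) (ps : List Int) (a : Int) : Int × List Int :=
  match fuel with
  | 0 => (a, ps)
  | f + 1 =>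
    let p := PySem.List.pyGetD ps a 0
    if p = a then (a, ps)
    else
      let r := pvFindB f ps p
      (r.1, PySem.List.pySetD r.2 a r.1)

def pvLoopB : List (String × Int × Int) → List Int → List String → List String
  | [], _, result => result
  | (query, v1, v2) :: rest, ps, result =>
    let f1 := pvFindB (ps.length + 2) ps v1
    let f2 := pvFindB (f1.2.length + 2) f1.2 v2
    if query = "ask" then
      pvLoopB rest f2.2 (result ++ [if f1.1 = f2.1 then "YES" else "NO"])
    else
      pvLoopB rest (PySem.List.pySetD f2.2 f2.1 f1.1) result

def process_queries_alt (queries : List (String × Int × Int)) : List String :=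
  (pvLoopB queries.reverse (PySem.List.pyRange 0 (queries.length : Int) 1) []).reverse

-- ===== PRECONDITION & SPEC =====
-- Pre_ excludes exactly the inputs where A raises IndexError: some query holds a vertex
-- outside [-n, n) for n = len(queries) (find indexes parents, of length n, with it).
def Pre_process_queries (queries : List (String × Int × Int)) : Prop :=
  ∀ t ∈ queries, (-(queries.length : Int) ≤ t.2.1 ∧ t.2.1 < (queries.length : Int)) ∧
                 (-(queries.length : Int) ≤ t.2.2 ∧ t.2.2 < (queries.length : Int))
instance (queries : List (String × Int × Int)) : Decidable (Pre_process_queries queries) := by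
  unfold Pre_process_queries; infer_instance

def pvWitness_process_queries : (List (String × Int × Int)) :=
  [("cut", 0, 1), ("ask", 0, 1), ("ask", -1, 2)]

def Spec_process_queries (queries : List (String × Int × Int)) (out : List String) : Prop := out = process_queries_alt queries
instance (queries : List (String × Int × Int)) (out : List String) : Decidable (Spec_process_queries queries out) := by unfold Spec_process_queries; infer_instance

-- ===== CLAIM (what is proved, stated in full; the proofs are below) =====
def Claim_equal_process_queries : Prop := ∀ (queries : List (String × Int × Int)), Dom_process_queries queries → Pre_process_queries queries → Spec_process_queries queries (process_queries queries)

-- ===== LEMMAS AND PROOFS =====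

-- index normalisation: the cell of parents that Python's xs[i] touches
def pvNrm (n : Nat) (i : Int) : Nat := if 0 ≤ i then i.toNat else n - (-i).toNat

def pvIR (n : Nat) (i : Int) : Prop := -(n : Int) ≤ i ∧ i < (n : Int)

-- every entry is a valid nonnegative vertex
def pvRng (ps : List Int) : Prop :=
  ∀ c : Nat, c < ps.length → 0 ≤ ps.getD c 0 ∧ ps.getD c 0 < (ps.length : Int)

-- acyclicity: a rank function strictly decreasing along non-root parent edges
def pvDd (d : Nat → Nat) (ps : List Int) : Prop :=
  ∀ c : Nat, c < ps.length → ps.getD c 0 ≠ (c : Int) → d (ps.getD c 0).toNat < d c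

theorem pvNrm_lt {n : Nat} {i : Int} (h : pvIR n i) : pvNrm n i < n := by
  unfold pvNrm pvIR at *; split <;> omega

theorem pvNrm_nonneg_eq {n : Nat} {i : Int} (h : 0 ≤ i) : pvNrm n i = i.toNat := by
  simp [pvNrm, h]

theorem pvGetD_nrm (ps : List Int) (i : Int) (d : Int) (h : pvIR ps.length i) :
    PySem.List.pyGetD ps i d = ps.getD (pvNrm ps.length i) d := by
  obtain ⟨h1, h2⟩ := h
  simp only [PySem.List.pyGetD, PySem.List.pyGet?, PySem.List.pyIdx?, pvNrm,
    List.getD_eq_getElem?_getD]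
  split_ifs <;> simp

theorem pvSetD_nrm (ps : List Int) (i : Int) (v : Int) (h : pvIR ps.length i) :
    PySem.List.pySetD ps i v = ps.set (pvNrm ps.length i) v := by
  obtain ⟨h1, h2⟩ := h
  simp only [PySem.List.pySetD, PySem.List.pySet?, PySem.List.pyIdx?, pvNrm]
  split_ifs <;> simp

theorem pvGetD_set_self (ps : List Int) (k : Nat) (v : Int) (hk : k < ps.length) :
    (ps.set k v).getD k 0 = v := by
  simp [List.getD_eq_getElem?_getD, List.getElem?_set_self hk]

theorem pvGetD_set_ne (ps : List Int) (k c : Nat) (v : Int) (hne : c ≠ k) :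
    (ps.set k v).getD c 0 = ps.getD c 0 := by
  simp [List.getD_eq_getElem?_getD, List.getElem?_set_ne (Ne.symm hne)]

theorem pvSet_getD_self (ps : List Int) (k : Nat) :
    ps.set k (ps.getD k 0) = ps := by
  rcases Nat.lt_or_ge k ps.length with hk | hk
  · rw [List.getD_eq_getElem ps 0 hk]; exact List.set_getElem_self hk
  · exact List.set_eq_of_length_le hk

-- ===== walk lemmas =====

theorem pvWalk_range {ps : List Int} (hR : pvRng ps) :
    ∀ (f : Nat) (x : Int), 0 ≤ x → x < (ps.length : Int) →
      0 ≤ pvWalk f ps x ∧ pvWalk f ps x < (ps.length : Int) := by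
  intro f
  induction f with
  | zero => intro x hx0 hx1; exact ⟨hx0, hx1⟩
  | succ f ih =>
    intro x hx0 hx1
    have hIR : pvIR ps.length x := ⟨by omega, hx1⟩
    have hget : PySem.List.pyGetD ps x 0 = ps.getD (pvNrm ps.length x) 0 := pvGetD_nrm ps x 0 hIR
    have hcell : pvNrm ps.length x < ps.length := pvNrm_lt hIR
    have hval := hR _ hcell
    simp only [pvWalk]
    split
    · exact ⟨hx0, hx1⟩
    · rw [hget]; exact ih _ hval.1 hval.2

theorem pvWalk_d_le {ps : List Int} {d : Nat → Nat} (hR : pvRng ps) (hD : pvDd d ps) :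
    ∀ (f : Nat) (x : Int), 0 ≤ x → x < (ps.length : Int) →
      d (pvWalk f ps x).toNat ≤ d x.toNat := by
  intro f
  induction f with
  | zero => intro x _ _; simp [pvWalk]
  | succ f ih =>
    intro x hx0 hx1
    have hIR : pvIR ps.length x := ⟨by omega, hx1⟩
    have hget : PySem.List.pyGetD ps x 0 = ps.getD (pvNrm ps.length x) 0 := pvGetD_nrm ps x 0 hIR
    have hnrm : pvNrm ps.length x = x.toNat := pvNrm_nonneg_eq hx0
    have hcell : pvNrm ps.length x < ps.length := pvNrm_lt hIR
    have hval := hR _ hcell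
    simp only [pvWalk]
    split
    · exact le_refl _
    · rename_i hne
      rw [hget] at hne ⊢
      have hdlt : d (ps.getD (pvNrm ps.length x) 0).toNat < d x.toNat := by
        rw [hnrm] at hne ⊢
        exact hD _ (hnrm ▸ hcell) (by rw [Int.toNat_of_nonneg hx0]; exact hne)
      exact le_trans (ih _ hval.1 hval.2) (le_of_lt hdlt)

theorem pvWalk_congr {ps ps2 : List Int} {d : Nat → Nat} (hR : pvRng ps) (hD : pvDd d ps)
    (hlen : ps2.length = ps.length) :
    ∀ (f : Nat) (x : Int), 0 ≤ x → x < (ps.length : Int) →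
      (∀ c : Nat, c < ps.length → d c ≤ d x.toNat → ps2.getD c 0 = ps.getD c 0) →
      pvWalk f ps2 x = pvWalk f ps x := by
  intro f
  induction f with
  | zero => intro x _ _ _; rfl
  | succ f ih =>
    intro x hx0 hx1 hag
    have hIR : pvIR ps.length x := ⟨by omega, hx1⟩
    have hIR2 : pvIR ps2.length x := by rw [hlen]; exact hIR
    have hnrm : pvNrm ps.length x = x.toNat := pvNrm_nonneg_eq hx0
    have hcell : pvNrm ps.length x < ps.length := pvNrm_lt hIR
    have hget : PySem.List.pyGetD ps x 0 = ps.getD (pvNrm ps.length x) 0 := pvGetD_nrm ps x 0 hIR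
    have hget2 : PySem.List.pyGetD ps2 x 0 = ps2.getD (pvNrm ps.length x) 0 := by
      rw [pvGetD_nrm ps2 x 0 hIR2, hlen]
    have hagx : ps2.getD (pvNrm ps.length x) 0 = ps.getD (pvNrm ps.length x) 0 := by
      rw [hnrm]; exact hag _ (hnrm ▸ hcell) (le_refl _)
    have hval := hR _ hcell
    simp only [pvWalk]
    rw [hget, hget2, hagx]
    split
    · rfl
    · rename_i hne
      have hdlt : d (ps.getD (pvNrm ps.length x) 0).toNat < d x.toNat := by
        rw [hnrm] at hne ⊢
        exact hD _ (hnrm ▸ hcell) (by rw [Int.toNat_of_nonneg hx0]; exact hne)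
      exact ih _ hval.1 hval.2 (fun c hc hdc => hag c hc (le_trans hdc (le_of_lt hdlt)))

theorem pvWalk_fix {ps : List Int} {x : Int} (hroot : PySem.List.pyGetD ps x 0 = x) :
    ∀ f, pvWalk f ps x = x := by
  intro f; induction f with
  | zero => rfl
  | succ f ih => simp only [pvWalk]; rw [hroot]; simp

theorem pvCompress_fix {ps : List Int} {x r : Int} (hroot : PySem.List.pyGetD ps x 0 = x) :
    ∀ f, pvCompress f ps x r = ps := by
  intro f; cases f with
  | zero => rfl
  | succ f => simp only [pvCompress]; rw [hroot]; simp

-- ===== the key commutation: the final write of B's recursive find can be pushed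
-- ===== through A's compression loop

theorem pvRng_set {ps : List Int} {v : Int} (hR : pvRng ps) (hv0 : 0 ≤ v)
    (hv1 : v < (ps.length : Int)) (k : Nat) : pvRng (ps.set k v) := by
  intro c hc
  rw [List.length_set] at hc
  rw [List.length_set]
  by_cases hck : c = k
  · subst hck; rw [pvGetD_set_self ps c v hc]; exact ⟨hv0, hv1⟩
  · rw [pvGetD_set_ne ps k c v hck]; exact hR c hc

theorem pvDd_set {ps : List Int} {d : Nat → Nat} {v : Int} (hD : pvDd d ps) (k : Nat)
    (hv : v ≠ (k : Int) → d v.toNat < d k) : pvDd d (ps.set k v) := by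
  intro c hc hne
  rw [List.length_set] at hc
  by_cases hck : c = k
  · subst hck
    rw [pvGetD_set_self ps c v hc] at hne ⊢
    exact hv hne
  · rw [pvGetD_set_ne ps k c v hck] at hne ⊢
    exact hD c hc hne

theorem pvCompress_set_comm {d : Nat → Nat} :
    ∀ (f : Nat) (ps : List Int) (a x r : Int),
      pvRng ps → pvDd d ps → pvIR ps.length a → 0 ≤ x → x < (ps.length : Int) →
      d x.toNat < d (pvNrm ps.length a) → r = pvWalk f ps x →
      PySem.List.pySetD (pvCompress f ps x r) a r
        = pvCompress f (PySem.List.pySetD ps a r) x r := by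
  intro f
  induction f with
  | zero => intro ps a x r _ _ _ _ _ _ _; rfl
  | succ f ih =>
    intro ps a x r hR hD ha hx0 hx1 hdlt hr
    have hcast : ((x.toNat : Nat) : Int) = x := Int.toNat_of_nonneg hx0
    have hIRx : pvIR ps.length x := ⟨by omega, hx1⟩
    have hcx_lt : x.toNat < ps.length := by omega
    have hca_lt : pvNrm ps.length a < ps.length := pvNrm_lt ha
    have hcax : x.toNat ≠ pvNrm ps.length a := by
      intro h; rw [h] at hdlt; omega
    have hgetx : PySem.List.pyGetD ps x 0 = ps.getD x.toNat 0 := by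
      rw [pvGetD_nrm ps x 0 hIRx, pvNrm_nonneg_eq hx0]
    have hq := hR _ hcx_lt
    have hsa : PySem.List.pySetD ps a r = ps.set (pvNrm ps.length a) r := pvSetD_nrm ps a r ha
    have hIRx' : pvIR (PySem.List.pySetD ps a r).length x := by
      rw [PySem.List.length_pySetD]; exact hIRx
    have hgetx' : PySem.List.pyGetD (PySem.List.pySetD ps a r) x 0 = ps.getD x.toNat 0 := by
      rw [pvGetD_nrm _ x 0 hIRx', PySem.List.length_pySetD, pvNrm_nonneg_eq hx0, hsa,
        pvGetD_set_ne ps _ _ r hcax]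
    simp only [pvCompress]
    rw [hgetx, hgetx']
    by_cases hstop : ps.getD x.toNat 0 = x
    · rw [if_pos hstop, if_pos hstop]
    · rw [if_neg hstop, if_neg hstop]
      -- step case
      have hrr : 0 ≤ r ∧ r < (ps.length : Int) := hr ▸ pvWalk_range hR (f + 1) x hx0 hx1
      have hqx : ps.getD x.toNat 0 ≠ ((x.toNat : Nat) : Int) := by rw [hcast]; exact hstop
      have hdq : d (ps.getD x.toNat 0).toNat < d x.toNat := hD _ hcx_lt hqx
      have hrstep : r = pvWalk f ps (ps.getD x.toNat 0) := by
        rw [hr]; simp only [pvWalk]; rw [hgetx, if_neg hstop]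
      have hdr : d r.toNat ≤ d (ps.getD x.toNat 0).toNat := by
        rw [hrstep]; exact pvWalk_d_le hR hD f _ hq.1 hq.2
      have hsx : PySem.List.pySetD ps x r = ps.set x.toNat r := by
        rw [pvSetD_nrm ps x r hIRx, pvNrm_nonneg_eq hx0]
      -- rewrite the inner double write on the right
      have hinner : PySem.List.pySetD (PySem.List.pySetD ps a r) x r
          = PySem.List.pySetD (ps.set x.toNat r) a r := by
        rw [pvSetD_nrm _ x r hIRx', PySem.List.length_pySetD, pvNrm_nonneg_eq hx0, hsa,
          List.set_comm r r (Ne.symm hcax),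
          pvSetD_nrm (ps.set x.toNat r) a r (by rw [List.length_set]; exact ha)]
        congr 1
        unfold pvNrm
        rw [List.length_set]
      rw [hinner]
      -- apply the induction hypothesis on the written array
      have hlen1 : (ps.set x.toNat r).length = ps.length := List.length_set ..
      have hR1 : pvRng (ps.set x.toNat r) := by
        have := pvRng_set hR hrr.1 hrr.2 x.toNat
        intro c hc; rw [hlen1] at hc ⊢; exact (by simpa [hlen1] using this c (by simpa [hlen1] using hc))
      have hD1 : pvDd d (ps.set x.toNat r) := by
        refine pvDd_set hD x.toNat (fun hne => ?_)
        exact lt_of_le_of_lt hdr hdq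
      have hcongr : pvWalk f (ps.set x.toNat r) (ps.getD x.toNat 0) = pvWalk f ps (ps.getD x.toNat 0) := by
        refine pvWalk_congr hR hD hlen1 f _ hq.1 hq.2 (fun c hc hdc => ?_)
        have hcne : c ≠ x.toNat := by
          intro h; rw [h] at hdc; omega
        exact pvGetD_set_ne ps _ _ r hcne
      have := ih (ps.set x.toNat r) a (ps.getD x.toNat 0) r hR1 hD1
        (by rw [hlen1]; exact ha) hq.1 (by rw [hlen1]; exact hq.2)
        (by rw [show pvNrm (ps.set x.toNat r).length a = pvNrm ps.length a by rw [hlen1]]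
            exact lt_trans hdq hdlt)
        (by rw [hcongr]; exact hrstep)
      rw [hsx]
      exact this

-- ===== B's find computes the pair (root, compressed parents) of A's find

theorem pvFindB_eq {d : Nat → Nat} :
    ∀ (f : Nat) (ps : List Int) (a : Int),
      pvRng ps → pvDd d ps → pvIR ps.length a →
      pvFindB f ps a = (pvWalk f ps a, pvCompress f ps a (pvWalk f ps a)) := by
  intro f
  induction f with
  | zero => intro ps a _ _ _; rfl
  | succ f ih =>
    intro ps a hR hD ha
    have hca_lt : pvNrm ps.length a < ps.length := pvNrm_lt ha
    have hget : PySem.List.pyGetD ps a 0 = ps.getD (pvNrm ps.length a) 0 := pvGetD_nrm ps a 0 ha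
    have hp := hR _ hca_lt
    simp only [pvFindB, pvWalk, pvCompress]
    by_cases hpa : PySem.List.pyGetD ps a 0 = a
    · rw [if_pos hpa, if_pos hpa, if_pos hpa]
    · rw [if_neg hpa, if_neg hpa, if_neg hpa]
      have hIRp : pvIR ps.length (PySem.List.pyGetD ps a 0) := by
        rw [hget]; exact ⟨by have := hp.1; omega, hp.2⟩
      rw [ih ps _ hR hD hIRp]
      refine Prod.ext rfl ?_
      simp only
      by_cases hpc : PySem.List.pyGetD ps a 0 = ((pvNrm ps.length a : Nat) : Int)
      · -- the step lands on the very cell it came from: that cell is a root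
        have htn : (PySem.List.pyGetD ps a 0).toNat = pvNrm ps.length a := by
          rw [hpc, Int.toNat_natCast]
        have hrootp : PySem.List.pyGetD ps (PySem.List.pyGetD ps a 0) 0 = PySem.List.pyGetD ps a 0 := by
          rw [pvGetD_nrm ps _ 0 hIRp, pvNrm_nonneg_eq (by rw [hpc]; exact Int.natCast_nonneg _), htn,
            ← hget]
        have hwfix : pvWalk f ps (PySem.List.pyGetD ps a 0) = PySem.List.pyGetD ps a 0 :=
          pvWalk_fix hrootp f
        have hcfix : pvCompress f ps (PySem.List.pyGetD ps a 0) (pvWalk f ps (PySem.List.pyGetD ps a 0)) = ps := pvCompress_fix hrootp f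
        rw [hcfix, hwfix]
        have hsa : PySem.List.pySetD ps a (PySem.List.pyGetD ps a 0)
            = ps.set (pvNrm ps.length a) (PySem.List.pyGetD ps a 0) := pvSetD_nrm ps a _ ha
        have hrootp2 : PySem.List.pyGetD (PySem.List.pySetD ps a (PySem.List.pyGetD ps a 0)) (PySem.List.pyGetD ps a 0) 0 = PySem.List.pyGetD ps a 0 := by
          rw [pvGetD_nrm _ _ 0 (by rw [PySem.List.length_pySetD]; exact hIRp),
            PySem.List.length_pySetD, pvNrm_nonneg_eq (by rw [hpc]; exact Int.natCast_nonneg _), htn,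
            hsa, pvGetD_set_self _ _ _ hca_lt]
        rw [pvCompress_fix hrootp2 f]
      · -- genuinely distinct cells: use the commutation lemma
        have hdlt : d (PySem.List.pyGetD ps a 0).toNat < d (pvNrm ps.length a) := by
          rw [hget] at hpc ⊢
          exact hD _ hca_lt hpc
        exact pvCompress_set_comm f ps a _ _ hR hD ha (by rw [hget]; exact hp.1)
          (by rw [hget]; exact hp.2) hdlt rfl

-- ===== compression preserves length, ranges, the rank function and root cells =====

theorem pvCompress_length : ∀ (f : Nat) (ps : List Int) (a r : Int),
    (pvCompress f ps a r).length = ps.length := by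
  intro f
  induction f with
  | zero => intro ps a r; rfl
  | succ f ih =>
    intro ps a r
    simp only [pvCompress]
    split
    · rfl
    · rw [ih, PySem.List.length_pySetD]

theorem pvCompress_inv {d : Nat → Nat} :
    ∀ (f : Nat) (ps : List Int) (a r : Int),
      pvRng ps → pvDd d ps → pvIR ps.length a → r = pvWalk f ps a →
      pvRng (pvCompress f ps a r) ∧ pvDd d (pvCompress f ps a r) ∧
        (∀ c : Nat, c < ps.length → ps.getD c 0 = (c : Int) →
          (pvCompress f ps a r).getD c 0 = (c : Int)) := by
  intro f
  induction f with
  | zero => intro ps a r hR hD _ _; exact ⟨hR, hD, fun _ _ h => h⟩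
  | succ f ih =>
    intro ps a r hR hD ha hr
    have hca_lt : pvNrm ps.length a < ps.length := pvNrm_lt ha
    have hget : PySem.List.pyGetD ps a 0 = ps.getD (pvNrm ps.length a) 0 := pvGetD_nrm ps a 0 ha
    have hp := hR _ hca_lt
    simp only [pvCompress]
    by_cases hpa : PySem.List.pyGetD ps a 0 = a
    · rw [if_pos hpa]; exact ⟨hR, hD, fun _ _ h => h⟩
    · rw [if_neg hpa]
      have hIRp : pvIR ps.length (PySem.List.pyGetD ps a 0) := by
        rw [hget]; exact ⟨by have := hp.1; omega, hp.2⟩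
      have hrstep : r = pvWalk f ps (PySem.List.pyGetD ps a 0) := by
        rw [hr]; simp only [pvWalk]; rw [if_neg hpa]
      by_cases hpc : PySem.List.pyGetD ps a 0 = ((pvNrm ps.length a : Nat) : Int)
      · -- the parent cell is its own root: the write is a no-op
        have htn : (PySem.List.pyGetD ps a 0).toNat = pvNrm ps.length a := by
          rw [hpc, Int.toNat_natCast]
        have hrootp : PySem.List.pyGetD ps (PySem.List.pyGetD ps a 0) 0 = PySem.List.pyGetD ps a 0 := by
          rw [pvGetD_nrm ps _ 0 hIRp, pvNrm_nonneg_eq (by rw [hpc]; exact Int.natCast_nonneg _), htn,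
            ← hget]
        have hrp : r = PySem.List.pyGetD ps a 0 := by rw [hrstep, pvWalk_fix hrootp]
        have hsa : PySem.List.pySetD ps a r = ps := by
          rw [pvSetD_nrm ps a r ha, hrp, hget, pvSet_getD_self]
        have hrootp2 : PySem.List.pyGetD (PySem.List.pySetD ps a r) (PySem.List.pyGetD ps a 0) 0
            = PySem.List.pyGetD ps a 0 := by rw [hsa]; exact hrootp
        rw [pvCompress_fix hrootp2, hsa]
        exact ⟨hR, hD, fun _ _ h => h⟩
      · have hdp : d (PySem.List.pyGetD ps a 0).toNat < d (pvNrm ps.length a) := by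
          rw [hget] at hpc ⊢
          exact hD _ hca_lt hpc
        have hrr : 0 ≤ r ∧ r < (ps.length : Int) := by
          rw [hrstep]
          exact pvWalk_range hR f _ (by rw [hget]; exact hp.1) (by rw [hget]; exact hp.2)
        have hsa : PySem.List.pySetD ps a r = ps.set (pvNrm ps.length a) r := pvSetD_nrm ps a r ha
        have hdr : d r.toNat ≤ d (PySem.List.pyGetD ps a 0).toNat := by
          rw [hrstep]
          exact pvWalk_d_le hR hD f _ (by rw [hget]; exact hp.1) (by rw [hget]; exact hp.2)
        have hlen1 : (ps.set (pvNrm ps.length a) r).length = ps.length := List.length_set ..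
        have hR1 : pvRng (ps.set (pvNrm ps.length a) r) := pvRng_set hR hrr.1 hrr.2 _
        have hD1 : pvDd d (ps.set (pvNrm ps.length a) r) :=
          pvDd_set hD _ (fun _ => lt_of_le_of_lt hdr hdp)
        have hr1 : r = pvWalk f (ps.set (pvNrm ps.length a) r) (PySem.List.pyGetD ps a 0) := by
          rw [pvWalk_congr hR hD hlen1 f _ (by rw [hget]; exact hp.1) (by rw [hget]; exact hp.2)
            (fun c hc hdc => pvGetD_set_ne ps _ _ r (fun h => by rw [h] at hdc; omega))]
          exact hrstep
        obtain ⟨hRr, hDr, hPr⟩ := ih (ps.set (pvNrm ps.length a) r) (PySem.List.pyGetD ps a 0) r hR1 hD1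
          (by rw [hlen1]; exact hIRp) hr1
        rw [hsa]
        refine ⟨hRr, hDr, fun c hc hcroot => ?_⟩
        have hcne : c ≠ pvNrm ps.length a := by
          intro h
          rw [h] at hcroot
          rw [hget, hcroot] at hpc
          exact hpc rfl
        refine hPr c (by rw [hlen1]; exact hc) ?_
        rw [pvGetD_set_ne ps _ _ r hcne]
        exact hcroot

-- ===== with enough fuel the first loop of A's find reaches a genuine root =====

def pvPath : Nat → List Int → Int → List Int
  | 0, _, _ => []
  | f + 1, ps, x =>
    if PySem.List.pyGetD ps x 0 = x then []
    else x :: pvPath f ps (PySem.List.pyGetD ps x 0)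

theorem pvPath_d_le {ps : List Int} {d : Nat → Nat} (hR : pvRng ps) (hD : pvDd d ps) :
    ∀ (f : Nat) (x : Int), 0 ≤ x → x < (ps.length : Int) →
      ∀ y ∈ pvPath f ps x, (0 ≤ y ∧ y < (ps.length : Int)) ∧ d y.toNat ≤ d x.toNat := by
  intro f
  induction f with
  | zero => intro x _ _ y hy; simp [pvPath] at hy
  | succ f ih =>
    intro x hx0 hx1 y hy
    have hIRx : pvIR ps.length x := ⟨by omega, hx1⟩
    have hcx_lt : x.toNat < ps.length := by omega
    have hget : PySem.List.pyGetD ps x 0 = ps.getD x.toNat 0 := by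
      rw [pvGetD_nrm ps x 0 hIRx, pvNrm_nonneg_eq hx0]
    simp only [pvPath] at hy
    split at hy
    · simp at hy
    · rename_i hne
      rw [hget] at hne
      have hp := hR _ hcx_lt
      have hdp : d (ps.getD x.toNat 0).toNat < d x.toNat :=
        hD _ hcx_lt (by rw [Int.toNat_of_nonneg hx0]; exact hne)
      rcases List.mem_cons.mp hy with rfl | hy'
      · exact ⟨⟨hx0, hx1⟩, le_refl _⟩
      · rw [hget] at hy'
        obtain ⟨hyr, hyd⟩ := ih _ hp.1 hp.2 y hy'
        exact ⟨hyr, le_trans hyd (le_of_lt hdp)⟩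

theorem pvPath_pairwise {ps : List Int} {d : Nat → Nat} (hR : pvRng ps) (hD : pvDd d ps) :
    ∀ (f : Nat) (x : Int), 0 ≤ x → x < (ps.length : Int) →
      (pvPath f ps x).Pairwise (fun u v => d v.toNat < d u.toNat) := by
  intro f
  induction f with
  | zero => intro x _ _; simp [pvPath]
  | succ f ih =>
    intro x hx0 hx1
    have hIRx : pvIR ps.length x := ⟨by omega, hx1⟩
    have hcx_lt : x.toNat < ps.length := by omega
    have hget : PySem.List.pyGetD ps x 0 = ps.getD x.toNat 0 := by
      rw [pvGetD_nrm ps x 0 hIRx, pvNrm_nonneg_eq hx0]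
    simp only [pvPath]
    split
    · simp
    · rename_i hne
      rw [hget] at hne
      have hp := hR _ hcx_lt
      have hdp : d (ps.getD x.toNat 0).toNat < d x.toNat :=
        hD _ hcx_lt (by rw [Int.toNat_of_nonneg hx0]; exact hne)
      rw [hget]
      refine List.pairwise_cons.mpr ⟨fun y hy => ?_, ih _ hp.1 hp.2⟩
      obtain ⟨_, hyd⟩ := pvPath_d_le hR hD f _ hp.1 hp.2 y hy
      exact lt_of_le_of_lt hyd hdp

theorem pvPath_length_of_not_root {ps : List Int} (hR : pvRng ps) :
    ∀ (f : Nat) (x : Int), 0 ≤ x → x < (ps.length : Int) →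
      ps.getD (pvWalk f ps x).toNat 0 ≠ pvWalk f ps x → (pvPath f ps x).length = f := by
  intro f
  induction f with
  | zero => intro x _ _ _; rfl
  | succ f ih =>
    intro x hx0 hx1 hnr
    have hIRx : pvIR ps.length x := ⟨by omega, hx1⟩
    have hcx_lt : x.toNat < ps.length := by omega
    have hget : PySem.List.pyGetD ps x 0 = ps.getD x.toNat 0 := by
      rw [pvGetD_nrm ps x 0 hIRx, pvNrm_nonneg_eq hx0]
    simp only [pvPath, pvWalk] at *
    by_cases hroot : PySem.List.pyGetD ps x 0 = x
    · exfalso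
      rw [if_pos hroot] at hnr
      rw [hget] at hroot
      exact hnr (by rw [hroot])
    · rw [if_neg hroot] at hnr ⊢
      have hp : 0 ≤ PySem.List.pyGetD ps x 0 ∧ PySem.List.pyGetD ps x 0 < (ps.length : Int) := by
        rw [hget]; exact hR _ hcx_lt
      rw [List.length_cons, ih _ hp.1 hp.2 hnr]

theorem pvWalk_reaches_root {ps : List Int} {d : Nat → Nat} (hR : pvRng ps) (hD : pvDd d ps) :
    ∀ (f : Nat) (x : Int), 0 ≤ x → x < (ps.length : Int) → ps.length + 1 ≤ f →
      ps.getD (pvWalk f ps x).toNat 0 = pvWalk f ps x := by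
  intro f x hx0 hx1 hf
  by_contra hnr
  have hlen : (pvPath f ps x).length = f := pvPath_length_of_not_root hR f x hx0 hx1 hnr
  -- but the path is d-strictly-decreasing, hence without duplicates, inside [0, |ps|)
  have hpw := pvPath_pairwise hR hD f x hx0 hx1
  have hpwm : ((pvPath f ps x).map Int.toNat).Pairwise (fun u v => d v < d u) :=
    List.pairwise_map.mpr hpw
  have hnd : ((pvPath f ps x).map Int.toNat).Nodup :=
    hpwm.imp (fun {a b} h heq => by subst heq; exact lt_irrefl _ h)
  have hsub : ((pvPath f ps x).map Int.toNat).toFinset ⊆ Finset.range ps.length := by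
    intro z hz
    rw [List.mem_toFinset, List.mem_map] at hz
    obtain ⟨y, hy, rfl⟩ := hz
    obtain ⟨⟨_, hy1⟩, _⟩ := pvPath_d_le hR hD f x hx0 hx1 y hy
    rw [Finset.mem_range]
    omega
  have hcard : ((pvPath f ps x).map Int.toNat).toFinset.card
      = ((pvPath f ps x).map Int.toNat).length := List.toFinset_card_of_nodup hnd
  have := Finset.card_le_card hsub
  rw [hcard, List.length_map, hlen, Finset.card_range] at this
  omega

-- walk from any admissible start lands on a genuine root (fuel |ps| + 2)

theorem pvRoot_of_walk {ps : List Int} {d : Nat → Nat} (hR : pvRng ps) (hD : pvDd d ps)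
    {a : Int} (ha : pvIR ps.length a) :
    ps.getD (pvWalk (ps.length + 2) ps a).toNat 0 = pvWalk (ps.length + 2) ps a := by
  have hca_lt : pvNrm ps.length a < ps.length := pvNrm_lt ha
  have hget : PySem.List.pyGetD ps a 0 = ps.getD (pvNrm ps.length a) 0 := pvGetD_nrm ps a 0 ha
  have hp := hR _ hca_lt
  by_cases hroot : PySem.List.pyGetD ps a 0 = a
  · rw [pvWalk_fix hroot]
    have ha0 : 0 ≤ a := by rw [← hroot, hget]; exact hp.1
    rw [← pvNrm_nonneg_eq (n := ps.length) ha0, ← hget]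
    exact hroot
  · have hstep : pvWalk (ps.length + 2) ps a = pvWalk (ps.length + 1) ps (PySem.List.pyGetD ps a 0) := by
      show pvWalk (ps.length + 1 + 1) ps a = _
      simp only [pvWalk]
      rw [if_neg hroot]
    rw [hstep]
    exact pvWalk_reaches_root hR hD (ps.length + 1) _ (by rw [hget]; exact hp.1)
      (by rw [hget]; exact hp.2) (le_refl _)

theorem pvWalk_range' {ps : List Int} (hR : pvRng ps) {a : Int} (ha : pvIR ps.length a) (f : Nat) :
    0 ≤ pvWalk (f + 1) ps a ∧ pvWalk (f + 1) ps a < (ps.length : Int) := by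
  have hca_lt : pvNrm ps.length a < ps.length := pvNrm_lt ha
  have hget : PySem.List.pyGetD ps a 0 = ps.getD (pvNrm ps.length a) 0 := pvGetD_nrm ps a 0 ha
  have hp := hR _ hca_lt
  simp only [pvWalk]
  by_cases hroot : PySem.List.pyGetD ps a 0 = a
  · rw [if_pos hroot, ← hroot, hget]; exact hp
  · rw [if_neg hroot]
    exact pvWalk_range hR f _ (by rw [hget]; exact hp.1) (by rw [hget]; exact hp.2)

-- ===== a union edge keeps the structure acyclic =====

def pvReach (ps : List Int) (x y : Int) : Prop := ∃ f, pvWalk f ps x = y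

theorem pvUnion_inv {ps : List Int} {d : Nat → Nat} (hR : pvRng ps) (hD : pvDd d ps)
    {r1 r2 : Int} (h10 : 0 ≤ r1) (h11 : r1 < (ps.length : Int)) (h20 : 0 ≤ r2)
    (_h21 : r2 < (ps.length : Int))
    (hroot1 : ps.getD r1.toNat 0 = r1) (hroot2 : ps.getD r2.toNat 0 = r2) :
    pvRng (PySem.List.pySetD ps r2 r1) ∧ ∃ d', pvDd d' (PySem.List.pySetD ps r2 r1) := by
  have hset : PySem.List.pySetD ps r2 r1 = ps.set r2.toNat r1 :=
    PySem.List.pySetD_of_nonneg ps r1 h20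
  rw [hset]
  by_cases h12 : r1 = r2
  · have hkey := pvSet_getD_self ps r2.toNat
    rw [hroot2] at hkey
    rw [h12, hkey]
    exact ⟨hR, d, hD⟩
  · refine ⟨pvRng_set hR h10 h11 _, ?_⟩
    have hroot1' : PySem.List.pyGetD ps r1 0 = r1 := by
      rw [pvGetD_nrm ps r1 0 ⟨by omega, h11⟩, pvNrm_nonneg_eq h10]; exact hroot1
    refine ⟨fun c => @ite _ (pvReach ps (c : Int) r2) (Classical.propDecidable _)
      (d c + d r1.toNat + 1) (d c), ?_⟩
    intro c hc hne
    rw [List.length_set] at hc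
    have hr2n : ((r2.toNat : Nat) : Int) = r2 := Int.toNat_of_nonneg h20
    by_cases hcc : c = r2.toNat
    · subst hcc
      rw [pvGetD_set_self ps _ _ hc] at hne ⊢
      have hnotr : ¬ pvReach ps ((r1.toNat : Nat) : Int) r2 := by
        rw [Int.toNat_of_nonneg h10]
        rintro ⟨f, hf⟩
        rw [pvWalk_fix hroot1' f] at hf
        exact h12 hf
      have hyes : pvReach ps ((r2.toNat : Nat) : Int) r2 := ⟨0, by rw [hr2n]; rfl⟩
      beta_reduce
      rw [if_neg hnotr, if_pos hyes]
      omega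
    · rw [pvGetD_set_ne ps _ _ _ hcc] at hne ⊢
      have hdv : d (ps.getD c 0).toNat < d c := hD c hc hne
      have hv := hR c hc
      have hvn : (((ps.getD c 0).toNat : Nat) : Int) = ps.getD c 0 := Int.toNat_of_nonneg hv.1
      have hstep : ∀ f, pvWalk (f + 1) ps ((c : Nat) : Int) = pvWalk f ps (ps.getD c 0) := by
        intro f
        simp only [pvWalk]
        have hgc : PySem.List.pyGetD ps ((c : Nat) : Int) 0 = ps.getD c 0 := by
          rw [pvGetD_nrm ps _ 0 ⟨by omega, by exact_mod_cast hc⟩,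
            pvNrm_nonneg_eq (Int.natCast_nonneg _), Int.toNat_natCast]
        rw [hgc, if_neg hne]
      have hiff : pvReach ps ((c : Nat) : Int) r2 ↔ pvReach ps (ps.getD c 0) r2 := by
        constructor
        · rintro ⟨f, hf⟩
          cases f with
          | zero =>
            exfalso
            have : ((c : Nat) : Int) = r2 := hf
            exact hcc (by omega)
          | succ f =>
            rw [hstep f] at hf
            exact ⟨f, hf⟩
        · rintro ⟨f, hf⟩
          exact ⟨f + 1, by rw [hstep f]; exact hf⟩
      by_cases hreach : pvReach ps ((c : Nat) : Int) r2
      · beta_reduce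
        rw [if_pos hreach, if_pos (by rw [hvn]; exact hiff.mp hreach)]
        omega
      · beta_reduce
        rw [if_neg hreach, if_neg (by rw [hvn]; exact fun h => hreach (hiff.mpr h))]
        exact hdv

-- ===== the main loops agree =====

theorem pvLoop_eq :
    ∀ (qs : List (String × Int × Int)) (ps : List Int) (res : List String),
      pvRng ps → (∃ d, pvDd d ps) →
      (∀ t ∈ qs, pvIR ps.length t.2.1 ∧ pvIR ps.length t.2.2) →
      pvLoopB qs ps res = pvLoopA qs ps res := by
  intro qs
  induction qs with
  | nil => intro ps res _ _ _; rfl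
  | cons hd rest ih =>
    intro ps res hR hE hIRs
    obtain ⟨dd, hD⟩ := hE
    obtain ⟨q, v1, v2⟩ := hd
    have hv := hIRs (q, v1, v2) (List.mem_cons_self ..)
    have hv1 : pvIR ps.length v1 := hv.1
    have hv2 : pvIR ps.length v2 := hv.2
    have hfB1 : pvFindB (ps.length + 2) ps v1 = pvFindA ps v1 := by
      rw [pvFindB_eq (d := dd) (ps.length + 2) ps v1 hR hD hv1]; rfl
    have hA1 : pvFindA ps v1
        = (pvWalk (ps.length + 2) ps v1, pvCompress (ps.length + 2) ps v1 (pvWalk (ps.length + 2) ps v1)) := rfl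
    obtain ⟨hR1, hD1, hRt1⟩ :=
      pvCompress_inv (ps.length + 2) ps v1 (pvWalk (ps.length + 2) ps v1) hR hD hv1 rfl
    have hlen1 : (pvCompress (ps.length + 2) ps v1 (pvWalk (ps.length + 2) ps v1)).length = ps.length :=
      pvCompress_length ..
    have hr1rng : 0 ≤ pvWalk (ps.length + 2) ps v1 ∧ pvWalk (ps.length + 2) ps v1 < (ps.length : Int) :=
      pvWalk_range' hR hv1 (ps.length + 1)
    have hcast1 : (((pvWalk (ps.length + 2) ps v1).toNat : Nat) : Int) = pvWalk (ps.length + 2) ps v1 :=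
      Int.toNat_of_nonneg hr1rng.1
    have hroot1 : ps.getD (pvWalk (ps.length + 2) ps v1).toNat 0 = pvWalk (ps.length + 2) ps v1 :=
      pvRoot_of_walk hR hD hv1
    have hroot1' := hRt1 (pvWalk (ps.length + 2) ps v1).toNat (by omega) (by rw [hcast1]; exact hroot1)
    rw [hcast1] at hroot1'
    -- second find, on the compressed array
    set ps1 := pvCompress (ps.length + 2) ps v1 (pvWalk (ps.length + 2) ps v1) with hps1
    have hv2' : pvIR ps1.length v2 := by rw [hlen1]; exact hv2
    have hfB2 : pvFindB (ps1.length + 2) ps1 v2 = pvFindA ps1 v2 := by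
      rw [pvFindB_eq (d := dd) (ps1.length + 2) ps1 v2 hR1 hD1 hv2']; rfl
    have hA2 : pvFindA ps1 v2
        = (pvWalk (ps1.length + 2) ps1 v2, pvCompress (ps1.length + 2) ps1 v2 (pvWalk (ps1.length + 2) ps1 v2)) := rfl
    obtain ⟨hR2, hD2, hRt2⟩ :=
      pvCompress_inv (ps1.length + 2) ps1 v2 (pvWalk (ps1.length + 2) ps1 v2) hR1 hD1 hv2' rfl
    have hlen2 : (pvCompress (ps1.length + 2) ps1 v2 (pvWalk (ps1.length + 2) ps1 v2)).length = ps1.length :=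
      pvCompress_length ..
    have hr2rng : 0 ≤ pvWalk (ps1.length + 2) ps1 v2 ∧ pvWalk (ps1.length + 2) ps1 v2 < (ps1.length : Int) :=
      pvWalk_range' hR1 hv2' (ps1.length + 1)
    have hcast2 : (((pvWalk (ps1.length + 2) ps1 v2).toNat : Nat) : Int) = pvWalk (ps1.length + 2) ps1 v2 :=
      Int.toNat_of_nonneg hr2rng.1
    have hroot2 : ps1.getD (pvWalk (ps1.length + 2) ps1 v2).toNat 0 = pvWalk (ps1.length + 2) ps1 v2 :=
      pvRoot_of_walk hR1 hD1 hv2'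
    have hroot2' := hRt2 (pvWalk (ps1.length + 2) ps1 v2).toNat (by omega) (by rw [hcast2]; exact hroot2)
    rw [hcast2] at hroot2'
    have hroot1'' := hRt2 (pvWalk (ps.length + 2) ps v1).toNat (by omega) (by rw [hcast1]; exact hroot1')
    rw [hcast1] at hroot1''
    set ps2 := pvCompress (ps1.length + 2) ps1 v2 (pvWalk (ps1.length + 2) ps1 v2) with hps2
    -- transported membership hypothesis for the tail
    have hIR' : ∀ (m : Nat), m = ps.length → ∀ t ∈ rest, pvIR m t.2.1 ∧ pvIR m t.2.2 := by
      intro m hm t ht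
      rw [hm]
      exact hIRs t (List.mem_cons_of_mem _ ht)
    simp only [pvLoopA, pvLoopB]
    rw [hfB1]
    rw [hA1]
    simp only
    rw [hfB2, hA2]
    simp only
    by_cases hq : q = "ask"
    · rw [if_pos hq, if_pos hq]
      exact ih ps2 _ hR2 ⟨dd, hD2⟩ (hIR' ps2.length (by rw [hps2, hlen2, hlen1]))
    · rw [if_neg hq, if_neg hq]
      obtain ⟨hR3, hE3⟩ := pvUnion_inv hR2 hD2 hr1rng.1 (by rw [hps2, hlen2, hlen1]; exact hr1rng.2)
        hr2rng.1 (by rw [hps2, hlen2]; exact hr2rng.2) hroot1'' hroot2'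
      refine ih _ _ hR3 hE3 (hIR' _ ?_)
      rw [PySem.List.length_pySetD, hps2, hlen2, hlen1]

theorem pvInit_facts (n : Nat) :
    (PySem.List.pyRange 0 (n : Int) 1).length = n ∧
    (∀ c : Nat, c < n → (PySem.List.pyRange 0 (n : Int) 1).getD c 0 = (c : Int)) := by
  rw [PySem.List.pyRange_zero_natCast n]
  refine ⟨by simp, fun c hc => ?_⟩
  rw [List.getD_eq_getElem?_getD, List.getElem?_map, List.getElem?_range hc]
  rfl

-- ===== VERDICT (by name: the statement is the Claim_ definition above) =====
theorem process_queries_spec : Claim_equal_process_queries := by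
  intro queries _ hpre
  unfold Spec_process_queries process_queries process_queries_alt
  obtain ⟨hlen0, hget0⟩ := pvInit_facts queries.length
  have hR0 : pvRng (PySem.List.pyRange 0 (queries.length : Int) 1) := by
    intro c hc
    rw [hlen0] at hc
    rw [hget0 c hc, hlen0]
    constructor
    · exact Int.natCast_nonneg c
    · exact_mod_cast hc
  have hD0 : pvDd (fun _ => 0) (PySem.List.pyRange 0 (queries.length : Int) 1) := by
    intro c hc hne
    rw [hlen0] at hc
    exact absurd (hget0 c hc) hne
  have hIR0 : ∀ t ∈ queries.reverse,
      pvIR (PySem.List.pyRange 0 (queries.length : Int) 1).length t.2.1 ∧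
      pvIR (PySem.List.pyRange 0 (queries.length : Int) 1).length t.2.2 := by
    intro t ht
    rw [hlen0]
    obtain ⟨h1, h2⟩ := hpre t (List.mem_reverse.mp ht)
    exact ⟨h1, h2⟩
  rw [pvLoop_eq queries.reverse _ [] hR0 ⟨_, hD0⟩ hIR0]
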